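-- pv_equiv track=rewrite | github.com/NLiy/Timetabling | Group2_Timetabling.py | timetableHash
-- ===== SOURCE A (Python) =====
-- def timetableHash(timetable):
--     timetableHash = {}
--
--     for day, day_schedule in enumerate(timetable):
--         for timeslot, timeslot_schedule in enumerate(day_schedule):
--             for room, classIDs in enumerate(timeslot_schedule):
--                 if isinstance(classIDs, list) and classIDs:
--                     for classID in classIDs:
--                         if classID not in timetableHash:
--                             timetableHash[classID] = []
--
--                         start = timeslot
--
--                         position = day, start, room
--
--                         timetableHash[classID].append(position)
--
--     return timetableHash
-- ===== SOURCE B (Python) =====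
-- def timetableHash(timetable):
--     # Flatten the 3-D timetable into (classID, position) pairs, then group.
--     pairs = [(classID, (day, timeslot, room))
--              for day, day_schedule in enumerate(timetable)
--              for timeslot, timeslot_schedule in enumerate(day_schedule)
--              for room, classIDs in enumerate(timeslot_schedule)
--              if isinstance(classIDs, list) and classIDs
--              for classID in classIDs]
--     order = []
--     for classID, _ in pairs:
--         if classID not in order:
--             order.append(classID)
--     return {classID: [pos for c, pos in pairs if c == classID]
--             for classID in order}
-- ===== Notes on version B (the rewrite author's own statement) =====
-- stated objective: alternative
-- what changed: Replaces incremental per-element dict maintenance inside the triple-nested loop by a flatten-then-group pass: first collect a flat list of (classID, position) pairs, then compute the first-occurrence key order and build the dict by grouping the pairs per key.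
import Mathlib
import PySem

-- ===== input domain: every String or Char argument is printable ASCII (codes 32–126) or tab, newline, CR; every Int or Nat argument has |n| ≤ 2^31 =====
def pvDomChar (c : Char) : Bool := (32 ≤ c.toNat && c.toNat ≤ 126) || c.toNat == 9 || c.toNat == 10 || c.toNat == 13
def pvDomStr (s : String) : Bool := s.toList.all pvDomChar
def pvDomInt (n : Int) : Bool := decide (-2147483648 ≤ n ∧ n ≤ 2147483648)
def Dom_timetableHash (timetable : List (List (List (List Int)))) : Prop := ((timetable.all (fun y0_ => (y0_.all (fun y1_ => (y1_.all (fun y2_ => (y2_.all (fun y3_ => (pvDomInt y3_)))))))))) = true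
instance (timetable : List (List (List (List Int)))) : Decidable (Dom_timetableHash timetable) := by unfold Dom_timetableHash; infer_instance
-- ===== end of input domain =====

-- B replaces A's incremental dict maintenance by a flatten-then-group pass (alternative decomposition, same cost class).


-- ===== PORT A =====
-- Literal transliteration: triple-nested enumerate loops maintaining a PySem.Dict;
-- 'if classID not in d: d[classID] = []' then 'd[classID].append(position)'.
def timetableHash (timetable : List (List (List (List Int)))) : List (Int × List (Int × Int × Int)) :=
  let d : PySem.Dict Int (List (Int × Int × Int)) :=
    (PySem.List.enumerate timetable 0).foldl (fun d dp =>
      (PySem.List.enumerate dp.2 0).foldl (fun d tp =>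
        (PySem.List.enumerate tp.2 0).foldl (fun d rp =>
          if rp.2 ≠ [] then
            rp.2.foldl (fun d classID =>
              let d := if d.contains classID then d else d.insert classID []
              d.modify classID [] (fun v => v ++ [(dp.1, tp.1, rp.1)])) d
          else d) d) d) (PySem.Dict.mk [])
  d.items

-- ===== PORT B =====
-- B-side helper: the flat list of (classID, position) pairs (Source B's 'pairs' comprehension).
def pvPairs (timetable : List (List (List (List Int)))) : List (Int × (Int × Int × Int)) :=
  (PySem.List.enumerate timetable 0).flatMap (fun dp =>
    (PySem.List.enumerate dp.2 0).flatMap (fun tp =>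
      (PySem.List.enumerate tp.2 0).flatMap (fun rp =>
        if rp.2 ≠ [] then rp.2.map (fun classID => (classID, (dp.1, tp.1, rp.1))) else [])))

def timetableHash_alt (timetable : List (List (List (List Int)))) : List (Int × List (Int × Int × Int)) :=
  let pairs := pvPairs timetable
  let order : List Int := pairs.foldl (fun ord p => if ord.contains p.1 then ord else ord ++ [p.1]) []
  order.map (fun k => (k, (pairs.filter (fun q => q.1 == k)).map (·.2)))

-- ===== PRECONDITION & SPEC =====
def Spec_timetableHash (timetable : List (List (List (List Int)))) (out : List (Int × List (Int × Int × Int))) : Prop := out = timetableHash_alt timetable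
instance (timetable : List (List (List (List Int)))) (out : List (Int × List (Int × Int × Int))) : Decidable (Spec_timetableHash timetable out) := by unfold Spec_timetableHash; infer_instance

-- ===== CLAIM (what is proved, stated in full; the proofs are below) =====
def Claim_equal_timetableHash : Prop := ∀ (timetable : List (List (List (List Int)))), Dom_timetableHash timetable → Spec_timetableHash timetable (timetableHash timetable)

-- ===== LEMMAS AND PROOFS =====

-- A's inner loop body as a step function on the dict.
def pvStep (d : PySem.Dict Int (List (Int × Int × Int))) (p : Int × (Int × Int × Int)) :
    PySem.Dict Int (List (Int × Int × Int)) :=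
  let d := if d.contains p.1 then d else d.insert p.1 []
  d.modify p.1 [] (fun v => v ++ [p.2])

-- The same step on the raw association list (first component = keys).
def pvStepL (l : List (Int × List (Int × Int × Int))) (p : Int × (Int × Int × Int)) :
    List (Int × List (Int × Int × Int)) :=
  if p.1 ∈ l.map (·.1) then l.map (fun kv => if kv.1 = p.1 then (kv.1, kv.2 ++ [p.2]) else kv)
  else l ++ [(p.1, [p.2])]

-- positions of key k in the flat pair list (Source B's inner comprehension)
def pvPosOf (k : Int) (pairs : List (Int × (Int × Int × Int))) : List (Int × Int × Int) :=
  (pairs.filter (fun q => q.1 == k)).map (·.2)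

-- keys of `pairs` not in `seen`, in first-occurrence order
def pvNewKeys (seen : List Int) : List (Int × (Int × Int × Int)) → List Int
  | [] => []
  | p :: rest => if p.1 ∈ seen then pvNewKeys seen rest else p.1 :: pvNewKeys (seen ++ [p.1]) rest

lemma pvNewKeys_not_mem_seen (pairs : List (Int × (Int × Int × Int))) (seen : List Int)
    (k : Int) (hk : k ∈ pvNewKeys seen pairs) : k ∉ seen := by
  induction pairs generalizing seen with
  | nil => simp [pvNewKeys] at hk
  | cons p rest ih =>
    simp only [pvNewKeys] at hk
    split at hk
    · exact ih seen hk
    · rcases List.mem_cons.1 hk with h | h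
      · subst h; assumption
      · intro hs; exact (ih _ h) (by simp [hs])

lemma pvStep_items (d : PySem.Dict Int (List (Int × Int × Int))) (p : Int × (Int × Int × Int))
    (hnd : (d.items.map (·.1)).Nodup) : (pvStep d p).items = pvStepL d.items p := by
  obtain ⟨l⟩ := d
  simp only [pvStep, pvStepL, PySem.Dict.contains, PySem.Dict.modify, PySem.Dict.insert]
  by_cases hc : p.1 ∈ l.map (·.1)
  · have hany : l.any (fun q => q.1 == p.1) = true := by
      simp only [List.any_eq_true, beq_iff_eq]
      obtain ⟨kv, hkv, hfst⟩ := List.mem_map.1 hc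
      exact ⟨kv, hkv, hfst⟩
    simp only [hany, hc, if_pos]
    -- replace-all equals per-entry append, since keys are nodup and getD reads the first match
    induction l with
    | nil => simp at hc
    | cons q rest ih =>
      simp only [List.map_cons, List.nodup_cons, List.mem_map] at hnd
      by_cases hq : q.1 = p.1
      · have hget : (PySem.Dict.mk (q :: rest)).getD p.1 [] = q.2 := by
          simp [PySem.Dict.getD, PySem.Dict.get?, hq]
        have hrest : ∀ kv ∈ rest, kv.1 ≠ p.1 := by
          intro kv hkv h; exact hnd.1 ⟨kv, hkv, by rw [h, hq]⟩
        simp only [List.map_cons, hq, beq_self_eq_true, if_true, hget]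
        congr 1
        exact List.map_congr_left (fun kv hkv => by simp [hrest kv hkv])
      · have hc' : p.1 ∈ rest.map (·.1) := by
          rcases List.mem_map.1 hc with ⟨kv, hkv, hf⟩
          rcases List.mem_cons.1 hkv with h | h
          · exact absurd (h ▸ hf) hq
          · exact List.mem_map.2 ⟨kv, h, hf⟩
        have hany' : rest.any (fun q => q.1 == p.1) = true := by
          simp only [List.any_eq_true, beq_iff_eq]
          obtain ⟨kv, hkv, hfst⟩ := List.mem_map.1 hc'
          exact ⟨kv, hkv, hfst⟩
        have hget : (PySem.Dict.mk (q :: rest)).getD p.1 [] = (PySem.Dict.mk rest).getD p.1 [] := by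
          simp [PySem.Dict.getD, PySem.Dict.get?, hq]
        simp only [List.map_cons, beq_iff_eq, hq, if_false, hget]
        congr 1
        simpa [beq_iff_eq] using ih hnd.2 hc' hany'
  · have hany : l.any (fun q => q.1 == p.1) = false := by
      simp only [List.any_eq_false, beq_iff_eq]
      intro q hq h; exact hc (List.mem_map.2 ⟨q, hq, h⟩)
    have hget : (PySem.Dict.mk (l ++ [(p.1, ([] : List (Int × Int × Int)))])).getD p.1 [] = [] := by
      simp only [PySem.Dict.getD, PySem.Dict.get?]
      induction l with
      | nil => simp
      | cons q rest ih =>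
        simp only [List.any_eq_false, beq_iff_eq] at hany
        have hq : (q.1 == p.1) = false := by simp [hany q (by simp)]
        simp only [List.cons_append, List.find?_cons, hq]
        exact ih (by simp_all) (by simp_all) (by
          simp only [List.any_eq_false, beq_iff_eq]
          exact fun r hr => hany r (by simp [hr]))
    have hany2 : (l ++ [(p.1, ([] : List (Int × Int × Int)))]).any (fun q => q.1 == p.1) = true := by
      simp
    simp only [hany, Bool.false_eq_true, if_false, if_neg hc, hany2, if_true,
      hget]
    have hl : ∀ kv ∈ l, (fun (q : Int × List (Int × Int × Int)) =>
        if (q.1 == p.1) = true then (p.1, ([] : List (Int × Int × Int)) ++ [p.2]) else q) kv = kv := by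
      intro kv hkv
      have : (kv.1 == p.1) = false := by
        simpa using (List.any_eq_false.1 hany) kv hkv
      simp [this]
    simp only [List.map_append, List.map_congr_left hl]
    simp

lemma pvStepL_keys (l : List (Int × List (Int × Int × Int))) (p : Int × (Int × Int × Int)) :
    (pvStepL l p).map (·.1) = if p.1 ∈ l.map (·.1) then l.map (·.1) else l.map (·.1) ++ [p.1] := by
  unfold pvStepL
  split_ifs with h
  · simp only [List.map_map]
    exact List.map_congr_left (fun kv _ => by by_cases hk : kv.1 = p.1 <;> simp [hk])
  · simp

lemma pvStepL_keys_nodup (l : List (Int × List (Int × Int × Int))) (p : Int × (Int × Int × Int))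
    (hnd : (l.map (·.1)).Nodup) : ((pvStepL l p).map (·.1)).Nodup := by
  rw [pvStepL_keys]
  split_ifs with h
  · exact hnd
  · simp [List.nodup_append, hnd]
    exact fun a x hax ha => h (List.mem_map.2 ⟨(a, x), hax, ha⟩)

lemma pvFoldl_stepL (pairs : List (Int × (Int × Int × Int)))
    (l : List (Int × List (Int × Int × Int))) (hnd : (l.map (·.1)).Nodup) :
    pairs.foldl pvStepL l
      = l.map (fun kv => (kv.1, kv.2 ++ pvPosOf kv.1 pairs))
        ++ (pvNewKeys (l.map (·.1)) pairs).map (fun k => (k, pvPosOf k pairs)) := by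
  induction pairs generalizing l with
  | nil => simp [pvNewKeys, pvPosOf]
  | cons p rest ih =>
    have hpos_ne : ∀ k : Int, k ≠ p.1 → pvPosOf k (p :: rest) = pvPosOf k rest := by
      intro k hk
      simp [pvPosOf, beq_iff_eq, Ne.symm hk]
    have hpos_eq : pvPosOf p.1 (p :: rest) = p.2 :: pvPosOf p.1 rest := by
      simp [pvPosOf]
    simp only [List.foldl_cons]
    rw [ih (pvStepL l p) (pvStepL_keys_nodup l p hnd), pvStepL_keys]
    by_cases hc : p.1 ∈ l.map (·.1)
    · simp only [hc, if_true, pvStepL, List.map_map, pvNewKeys]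
      congr 1
      · refine List.map_congr_left (fun kv hkv => ?_)
        by_cases hk : kv.1 = p.1
        · simp [Function.comp, hk, hpos_eq]
        · simp [Function.comp, hk, hpos_ne kv.1 hk]
      · refine List.map_congr_left (fun k hk2 => ?_)
        have hkne : k ≠ p.1 := fun h => (pvNewKeys_not_mem_seen rest _ k hk2) (h ▸ hc)
        rw [hpos_ne k hkne]
    · simp only [hc, if_false, pvStepL, pvNewKeys, List.map_append]
      have hl : ∀ kv ∈ l, kv.1 ≠ p.1 := by
        intro kv hkv h; exact hc (List.mem_map.2 ⟨kv, hkv, h⟩)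
      rw [List.append_assoc]
      congr 1
      · exact List.map_congr_left (fun kv hkv => by rw [hpos_ne kv.1 (hl kv hkv)])
      · simp only [List.map_cons, List.map_nil, List.singleton_append, List.map_cons, hpos_eq]
        congr 1
        refine List.map_congr_left (fun k hk => ?_)
        have : k ≠ p.1 := by
          intro h
          exact pvNewKeys_not_mem_seen rest _ k hk (by simp [h])
        rw [hpos_ne k this]

lemma pvOrder_foldl (pairs : List (Int × (Int × Int × Int))) (ord : List Int) :
    pairs.foldl (fun ord p => if ord.contains p.1 then ord else ord ++ [p.1]) ord
      = ord ++ pvNewKeys ord pairs := by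
  induction pairs generalizing ord with
  | nil => simp [pvNewKeys]
  | cons p rest ih =>
    simp only [List.foldl_cons, pvNewKeys]
    by_cases hc : p.1 ∈ ord
    · rw [if_pos (by simpa using hc), if_pos hc, ih]
    · rw [if_neg (by simpa using hc), if_neg hc, ih]
      simp

-- A's nested folds compute the flat fold of pvStep over pvPairs.
lemma pvA_eq_flat (timetable : List (List (List (List Int)))) :
    timetableHash timetable = ((pvPairs timetable).foldl pvStep (PySem.Dict.mk [])).items := by
  simp only [timetableHash, pvPairs]
  rw [List.foldl_flatMap]
  congr 1
  refine PySem.List.foldl_congr_mem _ _ _ _ (fun d dp _ => ?_)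
  rw [List.foldl_flatMap]
  refine PySem.List.foldl_congr_mem _ _ _ _ (fun d tp _ => ?_)
  rw [List.foldl_flatMap]
  refine PySem.List.foldl_congr_mem _ _ _ _ (fun d rp _ => ?_)
  by_cases h : rp.2 = []
  · simp [h]
  · simp only [h, ne_eq, not_false_eq_true, if_pos, List.foldl_map]
    rfl

-- transport the list-level fold up to the Dict-level fold (nodup is invariant)
lemma pvFoldl_step_items (pairs : List (Int × (Int × Int × Int)))
    (d : PySem.Dict Int (List (Int × Int × Int))) (hnd : (d.items.map (·.1)).Nodup) :
    (pairs.foldl pvStep d).items = pairs.foldl pvStepL d.items := by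
  induction pairs generalizing d with
  | nil => rfl
  | cons p rest ih =>
    simp only [List.foldl_cons]
    rw [← pvStep_items d p hnd]
    exact ih (pvStep d p) (by rw [pvStep_items d p hnd]; exact pvStepL_keys_nodup _ _ hnd)

-- ===== VERDICT (by name: the statement is the Claim_ definition above) =====
theorem timetableHash_spec : Claim_equal_timetableHash := by
  intro timetable _
  unfold Spec_timetableHash
  rw [pvA_eq_flat, pvFoldl_step_items _ _ (by simp), pvFoldl_stepL _ _ (by simp)]
  simp only [timetableHash_alt, pvOrder_foldl]
  simp [pvPosOf]
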